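-- pv_equiv track=rewrite | github.com/pritihinduja11/StringPracticePrograms | pgm28.py | uppercaseM1
-- ===== SOURCE A (Python) =====
-- def uppercaseM1(s1):
--     n=len(s1)//2
--     res=""
--     for  i in range(len(s1)):
--         #uppercasing later half
--         if i>=n:
--             res+=s1[i].upper()
--         #maintaining same first half
--         else:
--             res+=s1[i]
--     return "".join(res)
-- ===== SOURCE B (Python) =====
-- def uppercaseM1(s1):
--     n = len(s1) // 2
--     return s1[:n] + s1[n:].upper()
-- ===== Notes on version B (the rewrite author's own statement) =====
-- stated objective: idiomatic
-- what changed: Replaces the index-by-index loop with a per-character branch by a closed-form two-slice expression: the unchanged first half plus .upper() applied to the whole second slice at once.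
import Mathlib
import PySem

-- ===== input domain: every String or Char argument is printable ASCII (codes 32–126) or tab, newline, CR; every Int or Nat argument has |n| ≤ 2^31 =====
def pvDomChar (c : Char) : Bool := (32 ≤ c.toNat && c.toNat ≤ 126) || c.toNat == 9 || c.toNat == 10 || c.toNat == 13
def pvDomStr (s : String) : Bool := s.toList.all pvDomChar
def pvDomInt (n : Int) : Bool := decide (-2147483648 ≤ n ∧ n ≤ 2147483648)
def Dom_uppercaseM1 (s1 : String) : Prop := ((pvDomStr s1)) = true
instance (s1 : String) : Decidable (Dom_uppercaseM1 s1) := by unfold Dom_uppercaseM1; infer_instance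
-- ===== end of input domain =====

-- B replaces A's per-index loop (with a branch on each index) by the idiomatic
-- two-slice closed form s1[:n] + s1[n:].upper(); return values proved equal.

-- ===== PORT A =====
-- literal port of A: n = len//2, then a loop over range(len(s1)) appending
-- s1[i].upper() for i >= n and s1[i] unchanged otherwise.
def uppercaseM1 (s1 : String) : String :=
  let l := s1.toList
  let n : Int := PySem.Int.floordiv (PySem.Chars.len l) 2
  String.ofList ((PySem.List.pyRange 0 (PySem.Chars.len l) 1).foldl
    (fun res i =>
      if i ≥ n then res ++ [PySem.Chars.upperChar (PySem.List.pyGetD l i ' ')]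
      else res ++ [PySem.List.pyGetD l i ' ']) [])

-- ===== PORT B =====
-- literal port of B: s1[:n] + s1[n:].upper()
def uppercaseM1_alt (s1 : String) : String :=
  let l := s1.toList
  let n : Int := PySem.Int.floordiv (PySem.Chars.len l) 2
  String.ofList (PySem.Chars.slice l none (some n) ++
    PySem.Chars.upper (PySem.Chars.slice l (some n) none))

-- ===== PRECONDITION & SPEC =====
def Spec_uppercaseM1 (s1 : String) (out : String) : Prop := out = uppercaseM1_alt s1
instance (s1 : String) (out : String) : Decidable (Spec_uppercaseM1 s1 out) := by unfold Spec_uppercaseM1; infer_instance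

-- ===== CLAIM (what is proved, stated in full; the proofs are below) =====
def Claim_equal_uppercaseM1 : Prop := ∀ (s1 : String), Dom_uppercaseM1 s1 → Spec_uppercaseM1 s1 (uppercaseM1 s1)

-- ===== LEMMAS AND PROOFS =====

-- the loop of A, rewritten as a map over the range, equals B's two slices
theorem uppercaseM1_lists (l : List Char) :
    ((PySem.List.pyRange 0 (PySem.Chars.len l) 1).foldl
      (fun res i =>
        if i ≥ ((l.length / 2 : Nat) : Int) then res ++ [PySem.Chars.upperChar (PySem.List.pyGetD l i ' ')]
        else res ++ [PySem.List.pyGetD l i ' ']) []) =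
    l.take (l.length / 2) ++ (l.drop (l.length / 2)).map PySem.Chars.upperChar := by
  set n : Nat := l.length / 2 with hn
  have hbody : (fun (res : List Char) (i : Int) =>
      if i ≥ (n : Int) then res ++ [PySem.Chars.upperChar (PySem.List.pyGetD l i ' ')]
      else res ++ [PySem.List.pyGetD l i ' ']) =
      (fun res i => res ++ [if i ≥ (n : Int) then PySem.Chars.upperChar (PySem.List.pyGetD l i ' ')
        else PySem.List.pyGetD l i ' ']) := by
    funext res i; split_ifs <;> rfl
  rw [hbody, PySem.List.foldl_append_singleton_eq_map, List.nil_append]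
  apply List.ext_getElem
  · simp [PySem.List.length_pyRange_one, PySem.Chars.len_eq]
    omega
  · intro k h1 h2
    have hkl : k < l.length := by
      simpa [PySem.List.length_pyRange_one, PySem.Chars.len_eq] using h1
    rw [List.getElem_map]
    rw [PySem.List.getElem_pyRange_one]
    simp only [zero_add]
    have hget : PySem.List.pyGetD l (k : Int) ' ' = l[k] := by
      rw [PySem.List.pyGetD_natCast]
      exact List.getD_eq_getElem l ' ' hkl
    by_cases hk : k < n
    · have : ¬ ((k : Int) ≥ (n : Int)) := by exact_mod_cast Nat.not_le.mpr hk
      rw [if_neg this, hget]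
      rw [List.getElem_append_left (by simpa [hn] using (by omega : k < min n l.length))]
      simp
    · have hge : (k : Int) ≥ (n : Int) := by exact_mod_cast Nat.not_lt.mp hk
      rw [if_pos hge, hget]
      have hnk : n ≤ k := Nat.not_lt.mp hk
      have hlen : (l.take n).length = n := by simp [hn]; omega
      rw [List.getElem_append_right (by omega : (l.take n).length ≤ k)]
      simp [hlen, hnk]

-- ===== VERDICT (by name: the statement is the Claim_ definition above) =====
theorem uppercaseM1_spec : Claim_equal_uppercaseM1 := by
  intro s1 _
  unfold Spec_uppercaseM1 uppercaseM1 uppercaseM1_alt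
  set l := s1.toList
  have hn : PySem.Int.floordiv (PySem.Chars.len l) 2 = ((l.length / 2 : Nat) : Int) := by
    rw [PySem.Chars.len_eq]
    exact_mod_cast PySem.Int.floordiv_natCast l.length 2
  simp only [hn, PySem.Chars.slice_eq_listSlice]
  rw [PySem.List.slice_to_natCast, PySem.List.slice_from_natCast]
  rw [uppercaseM1_lists l]
  congr 1
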